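-- pv_equiv track=rewrite | github.com/zsq541012232/COAD | functions/utils/datatools.py | align_matrix
-- ===== SOURCE A (Python) =====
-- def get_dict_key(dic, value):
--     keys = list(dic.keys())
--     values = list(dic.values())
--     if value not in values:
--         return None
--     idx = values.index(value)
--     key = keys[idx]
--     return key
--
-- def list_reverse(nums):
--     return list(map(list, zip(*nums)))
--
-- def find_col(matrix, col_num):
--     matrix_w = len(matrix[0])
--     if col_num >= matrix_w:
--         return None
--     matrix_h = len(matrix)
--     col_list = []
--     for i in range(matrix_h):
--         col_list.append(matrix[i][col_num])
--     return col_list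
--
-- def align_matrix(tuple_dict_1, matrix_1, tuple_dict_2, matrix_2):
--     if len(tuple_dict_1) != len(tuple_dict_2):
--         return None
--     new_matrix_2_T = []
--     for index, value in tuple_dict_1.items():
--         if tuple_dict_2[index] == value:
--             new_row = find_col(matrix_1, index)
--             new_matrix_2_T.append(new_row)
--         else:
--             index_find = get_dict_key(tuple_dict_2, value)
--             new_row = find_col(matrix_2, index_find)
--             new_matrix_2_T.append(new_row)
--     new_matrix_2 = list_reverse(new_matrix_2_T)
--     return new_matrix_2
-- ===== SOURCE B (Python) =====
-- def align_matrix(tuple_dict_1, matrix_1, tuple_dict_2, matrix_2):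
--     if len(tuple_dict_1) != len(tuple_dict_2):
--         return None
--     # selection phase: one (source_matrix, column) pair per dict_1 item
--     plan = []
--     for index, value in tuple_dict_1.items():
--         if tuple_dict_2[index] == value:
--             plan.append((matrix_1, index))
--         else:
--             col = next(k for k, v in tuple_dict_2.items() if v == value)
--             plan.append((matrix_2, col))
--     if not plan:
--         return []
--     # build the result row-major, truncated to the shortest source matrix
--     num_rows = min(len(m) for m, _ in plan)
--     return [[m[r][c] for m, c in plan] for r in range(num_rows)]
-- ===== Notes on version B (the rewrite author's own statement) =====
-- stated objective: alternative
-- what changed: B replaces A's column-extraction-then-transpose scheme (find_col per dict item, then zip(*cols)) with a plan of (source_matrix, column) pairs and a single row-major comprehension truncated to the shortest source matrix, never materialising per-column lists or calling zip.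
import Mathlib
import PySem

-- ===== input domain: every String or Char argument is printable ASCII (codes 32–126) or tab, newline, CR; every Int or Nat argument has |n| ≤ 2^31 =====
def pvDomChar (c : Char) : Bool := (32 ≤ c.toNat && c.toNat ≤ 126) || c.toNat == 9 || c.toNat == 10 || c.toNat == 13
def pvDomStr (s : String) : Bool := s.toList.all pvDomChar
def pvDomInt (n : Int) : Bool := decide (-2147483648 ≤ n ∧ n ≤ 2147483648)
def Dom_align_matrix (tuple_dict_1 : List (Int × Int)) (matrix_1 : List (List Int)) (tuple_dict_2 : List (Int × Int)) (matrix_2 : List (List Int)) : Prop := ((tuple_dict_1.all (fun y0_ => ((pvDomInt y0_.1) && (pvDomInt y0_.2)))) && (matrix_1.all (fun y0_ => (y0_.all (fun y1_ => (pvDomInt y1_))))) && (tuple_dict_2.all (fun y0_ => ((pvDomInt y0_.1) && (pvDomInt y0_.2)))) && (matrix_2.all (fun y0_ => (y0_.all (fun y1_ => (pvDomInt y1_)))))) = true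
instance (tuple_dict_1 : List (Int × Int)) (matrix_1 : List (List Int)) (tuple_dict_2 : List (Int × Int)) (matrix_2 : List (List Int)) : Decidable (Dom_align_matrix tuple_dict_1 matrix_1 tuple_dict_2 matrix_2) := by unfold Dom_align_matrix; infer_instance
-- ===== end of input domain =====

-- B replaces the column-extraction-then-transpose scheme with a (matrix, column) plan and a
-- row-major build truncated to the shortest source matrix (objective: alternative decomposition).

-- ===== PORT A =====
-- Python: tuple_dict_2[index]  (first-match lookup on the association list; none = KeyError)
def pvDictGet (d : List (Int × Int)) (k : Int) : Option Int :=
  (d.find? (fun q => q.1 == k)).map (·.2)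

-- Python get_dict_key: keys/values lists, values.index, keys[idx]; None when value absent
def get_dict_key (d : List (Int × Int)) (v : Int) : Option Int :=
  let keys := d.map (·.1)
  let values := d.map (·.2)
  if values.contains v then
    match PySem.List.index? values v with
    | some idx => keys[idx]?
    | none => none
  else none

-- Python find_col: width check on matrix[0] (none = IndexError on empty matrix / the None return
-- Python later feeds to zip, both outside Pre_), then append matrix[i][col] row by row
def find_col (matrix : List (List Int)) (c : Int) : Option (List Int) :=
  match matrix.head? with
  | none => none
  | some row0 =>
    if (row0.length : Int) ≤ c then none
    else matrix.foldl (fun acc row =>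
      acc.bind (fun l => (PySem.List.pyGet? row c).map (fun x => l ++ [x]))) (some [])

-- Python zip(*nums): emit heads while no sequence is exhausted
def pyZip (rows : List (List Int)) : List (List Int) :=
  match rows with
  | [] => []
  | r :: rs =>
    if (r :: rs).any List.isEmpty then []
    else ((r :: rs).map (fun x => x.headD 0)) :: pyZip ((r :: rs).map List.tail)
termination_by (rows.headD []).length
decreasing_by
  simp only [List.any_eq_true, not_exists] at *
  cases r with
  | nil => simp at *
  | cons a as => simp

def list_reverse (nums : List (List Int)) : List (List Int) := pyZip nums

def align_matrix (tuple_dict_1 : List (Int × Int)) (matrix_1 : List (List Int)) (tuple_dict_2 : List (Int × Int)) (matrix_2 : List (List Int)) : Option (List (List Int)) :=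
  if tuple_dict_1.length ≠ tuple_dict_2.length then none
  else
    let colsOpt : Option (List (List Int)) := tuple_dict_1.foldl (fun acc p =>
      acc.bind (fun cols =>
        match pvDictGet tuple_dict_2 p.1 with
        | none => none  -- KeyError (outside Pre_)
        | some w =>
          if w = p.2 then (find_col matrix_1 p.1).map (fun col => cols ++ [col])
          else
            match get_dict_key tuple_dict_2 p.2 with
            | none => none  -- find_col(matrix, None) raises TypeError (outside Pre_)
            | some j => (find_col matrix_2 j).map (fun col => cols ++ [col]))) (some [])
    colsOpt.map list_reverse

-- ===== PORT B =====
-- selection loop of Source B: plan of (use_matrix_1?, column) pairs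
def pvPlan (d1 d2 : List (Int × Int)) : Option (List (Bool × Int)) :=
  d1.foldl (fun acc p =>
    acc.bind (fun plan =>
      match pvDictGet d2 p.1 with
      | none => none  -- KeyError (outside Pre_)
      | some w =>
        if w = p.2 then some (plan ++ [(true, p.1)])
        else
          match d2.find? (fun q => q.2 == p.2) with
          | none => none  -- next() raises StopIteration (outside Pre_)
          | some q => some (plan ++ [(false, q.1)]))) (some [])

-- Python min(...) over a nonempty generator
def pvMinNat : List Nat → Nat
  | [] => 0
  | x :: xs => xs.foldl Nat.min x

def align_matrix_alt (tuple_dict_1 : List (Int × Int)) (matrix_1 : List (List Int)) (tuple_dict_2 : List (Int × Int)) (matrix_2 : List (List Int)) : Option (List (List Int)) :=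
  if tuple_dict_1.length ≠ tuple_dict_2.length then none
  else (pvPlan tuple_dict_1 tuple_dict_2).map (fun plan =>
    if plan.isEmpty then []
    else
      let numRows := pvMinNat (plan.map (fun pc => (if pc.1 then matrix_1 else matrix_2).length))
      (List.range numRows).map (fun r =>
        plan.map (fun pc =>
          -- m[r][c]: r is a valid nonneg row index; c may be negative (Python wraps); the
          -- .getD 0 default is never reached inside Pre_ (there c would raise IndexError)
          (PySem.List.pyGet? ((if pc.1 then matrix_1 else matrix_2).getD r []) pc.2).getD 0)))

-- ===== PRECONDITION & SPEC =====
-- the selector of both programs, used only to STATE the precondition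
def pvSel (d2 : List (Int × Int)) (p : Int × Int) : Option (Bool × Int) :=
  match pvDictGet d2 p.1 with
  | none => none
  | some w =>
    if w = p.2 then some (true, p.1)
    else (d2.find? (fun q => q.2 == p.2)).map (fun q => (false, q.1))

-- column c of M is readable: M nonempty, c below the first row's width, and every row indexable at c
def pvColOK (M : List (List Int)) (c : Int) : Bool :=
  !M.isEmpty && decide (c < ((M.headD []).length : Int)) && M.all (fun row => (PySem.List.pyGet? row c).isSome)

-- Pre_ excludes (a) association lists with duplicate keys, which a Python dict argument cannot
-- exhibit (the dict merges them), and (b) exactly the inputs where A raises: a dict_1 key missing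
-- from dict_2 whose value is also absent from dict_2's values, or a selected column that is empty,
-- out of width, or unindexable in some row.
def Pre_align_matrix (tuple_dict_1 : List (Int × Int)) (matrix_1 : List (List Int)) (tuple_dict_2 : List (Int × Int)) (matrix_2 : List (List Int)) : Prop :=
  (tuple_dict_1.map Prod.fst).Nodup ∧ (tuple_dict_2.map Prod.fst).Nodup ∧
  (tuple_dict_1.length = tuple_dict_2.length →
    tuple_dict_1.all (fun p =>
      Option.any (fun bc => pvColOK (if bc.1 then matrix_1 else matrix_2) bc.2) (pvSel tuple_dict_2 p)) = true)
instance (tuple_dict_1 : List (Int × Int)) (matrix_1 : List (List Int)) (tuple_dict_2 : List (Int × Int)) (matrix_2 : List (List Int)) : Decidable (Pre_align_matrix tuple_dict_1 matrix_1 tuple_dict_2 matrix_2) := by unfold Pre_align_matrix; infer_instance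

def pvWitness_align_matrix : (List (Int × Int)) × List (List Int) × (List (Int × Int)) × List (List Int) :=
  ([(0, 1), (1, 2)], [[10, 20], [30, 40]], [(0, 2), (1, 1)], [[5, 6], [7, 8]])

def Spec_align_matrix (tuple_dict_1 : List (Int × Int)) (matrix_1 : List (List Int)) (tuple_dict_2 : List (Int × Int)) (matrix_2 : List (List Int)) (out : Option (List (List Int))) : Prop := out = align_matrix_alt tuple_dict_1 matrix_1 tuple_dict_2 matrix_2
instance (tuple_dict_1 : List (Int × Int)) (matrix_1 : List (List Int)) (tuple_dict_2 : List (Int × Int)) (matrix_2 : List (List Int)) (out : Option (List (List Int))) : Decidable (Spec_align_matrix tuple_dict_1 matrix_1 tuple_dict_2 matrix_2 out) := by unfold Spec_align_matrix; infer_instance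

-- ===== CLAIM (what is proved, stated in full; the proofs are below) =====
def Claim_equal_align_matrix : Prop := ∀ (tuple_dict_1 : List (Int × Int)) (matrix_1 : List (List Int)) (tuple_dict_2 : List (Int × Int)) (matrix_2 : List (List Int)), Dom_align_matrix tuple_dict_1 matrix_1 tuple_dict_2 matrix_2 → Pre_align_matrix tuple_dict_1 matrix_1 tuple_dict_2 matrix_2 → Spec_align_matrix tuple_dict_1 matrix_1 tuple_dict_2 matrix_2 (align_matrix tuple_dict_1 matrix_1 tuple_dict_2 matrix_2)

-- ===== LEMMAS AND PROOFS =====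
-- the text of A's column (defined values inside Pre_)
def pvColVals (M : List (List Int)) (c : Int) : List Int :=
  M.map (fun row => (PySem.List.pyGet? row c).getD 0)

-- one selected column per dict_1 item, inside Pre_
def pvSels (d1 d2 : List (Int × Int)) : List (Bool × Int) :=
  d1.map (fun p => (pvSel d2 p).getD (true, 0))

theorem pv_foldl_min_le_init (xs : List Nat) (a : Nat) : xs.foldl Nat.min a ≤ a := by
  induction xs generalizing a with
  | nil => simp
  | cons x xs ih => simpa using le_trans (ih (Nat.min a x)) (Nat.min_le_left a x)

theorem pv_minNat_le (l : List Nat) (x : Nat) (hx : x ∈ l) : pvMinNat l ≤ x := by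
  cases l with
  | nil => simp at hx
  | cons y ys =>
    unfold pvMinNat
    rcases List.mem_cons.mp hx with h | h
    · subst h; exact pv_foldl_min_le_init ys x
    · clear hx
      induction ys generalizing y with
      | nil => simp at h
      | cons z zs ih =>
        rcases List.mem_cons.mp h with h' | h'
        · subst h'; exact le_trans (pv_foldl_min_le_init zs (Nat.min y x)) (Nat.min_le_right y x)
        · exact ih (Nat.min y z) h'

theorem pv_minNat_sub (l : List Nat) : pvMinNat (l.map (· - 1)) = pvMinNat l - 1 := by
  cases l with
  | nil => simp [pvMinNat]
  | cons x xs =>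
    simp only [List.map_cons, pvMinNat]
    induction xs generalizing x with
    | nil => simp
    | cons y ys ih =>
      simp only [List.map_cons, List.foldl_cons]
      rw [show Nat.min (x - 1) (y - 1) = Nat.min x y - 1 from Nat.sub_min_sub_right x y 1]
      exact ih _

theorem pv_gdk_eq_find (d : List (Int × Int)) (v : Int) :
    get_dict_key d v = (d.find? (fun q => q.2 == v)).map (·.1) := by
  induction d with
  | nil => simp [get_dict_key]
  | cons p rest ih =>
    by_cases hv : p.2 = v
    · have hc : ((p :: rest).map (·.2)).contains v = true := by simp [hv]
      have hi : PySem.List.index? ((p :: rest).map (·.2)) v = some 0 := by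
        simpa [hv] using PySem.List.index?_cons_self (x := v) (xs := rest.map (·.2))
      simp only [get_dict_key, hc, if_true]
      rw [hi, List.find?_cons_of_pos (by simp [hv])]
      simp
    · have h1 : PySem.List.index? ((p :: rest).map (·.2)) v
          = (PySem.List.index? (rest.map (·.2)) v).map (· + 1) := by
        simpa using PySem.List.index?_cons_of_ne (x := p.2) (v := v) (xs := rest.map (·.2)) hv
      simp only [get_dict_key] at *
      rw [List.find?_cons_of_neg (by simpa using hv)]
      by_cases hm : v ∈ rest.map (·.2)
      · have hmem : ((p :: rest).map (·.2)).contains v = true := by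
          simp; exact Or.inr (by simpa using hm)
        rw [if_pos hmem, h1]
        rw [if_pos (by simpa [List.contains_iff_mem] using hm)] at ih
        cases hidx : PySem.List.index? (rest.map (·.2)) v with
        | none =>
          simp at hidx
          obtain ⟨a, ha, he⟩ := List.mem_map.mp hm
          exact absurd (show (a.1, v) ∈ rest by rw [← he]; simpa using ha) (hidx a.1)
        | some i =>
          rw [hidx] at ih
          simpa using ih
      · rw [if_neg (by
          simp only [List.map_cons, List.contains_cons, Bool.or_eq_true, beq_iff_eq, not_or]
          constructor
          · intro h; exact hv h.symm
          · intro h; exact hm (by simpa [List.contains_iff_mem] using h))]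
        rw [if_neg (by intro h; exact hm (by simpa [List.contains_iff_mem] using h))] at ih
        exact ih

theorem pv_find_col_fold (M : List (List Int)) (c : Int) (init : List Int)
    (h : ∀ row ∈ M, (PySem.List.pyGet? row c).isSome = true) :
    M.foldl (fun acc row =>
        acc.bind (fun l => (PySem.List.pyGet? row c).map (fun x => l ++ [x]))) (some init)
      = some (init ++ pvColVals M c) := by
  induction M generalizing init with
  | nil => simp [pvColVals]
  | cons row rest ih =>
    have hr := h row (List.mem_cons_self)
    cases hg : PySem.List.pyGet? row c with
    | none => rw [hg] at hr; simp at hr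
    | some x =>
      simp only [List.foldl_cons, Option.bind_some, hg, Option.map_some]
      rw [ih _ (fun r hr' => h r (List.mem_cons_of_mem _ hr'))]
      simp [pvColVals, hg]

theorem pv_find_col_ok (M : List (List Int)) (c : Int) (h : pvColOK M c = true) :
    find_col M c = some (pvColVals M c) := by
  simp only [pvColOK, Bool.and_eq_true, decide_eq_true_eq, List.all_eq_true,
    Bool.not_eq_eq_eq_not] at h
  obtain ⟨⟨hne, hw⟩, hall⟩ := h
  cases M with
  | nil => simp at hne
  | cons row0 rest =>
    simp only [find_col, List.head?_cons]
    rw [if_neg (by simp only [List.headD_cons] at hw; omega)]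
    simpa using pv_find_col_fold (row0 :: rest) c [] hall

-- per-item consequence of Pre_
theorem pv_item_sel {d2 : List (Int × Int)} {m1 m2 : List (List Int)} {p : Int × Int}
    (h : Option.any (fun bc => pvColOK (if bc.1 then m1 else m2) bc.2) (pvSel d2 p) = true) :
    ∃ bc, pvSel d2 p = some bc ∧ pvColOK (if bc.1 then m1 else m2) bc.2 = true := by
  cases hs : pvSel d2 p with
  | none => rw [hs] at h; simp [Option.any] at h
  | some bc => rw [hs] at h; exact ⟨bc, rfl, by simpa [Option.any] using h⟩

theorem pv_plan_fold (d1 d2 : List (Int × Int)) (m1 m2 : List (List Int)) (init : List (Bool × Int))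
    (H : ∀ p ∈ d1, Option.any (fun bc => pvColOK (if bc.1 then m1 else m2) bc.2) (pvSel d2 p) = true) :
    d1.foldl (fun acc p =>
      acc.bind (fun plan =>
        match pvDictGet d2 p.1 with
        | none => none
        | some w =>
          if w = p.2 then some (plan ++ [(true, p.1)])
          else
            match d2.find? (fun q => q.2 == p.2) with
            | none => none
            | some q => some (plan ++ [(false, q.1)]))) (some init)
      = some (init ++ pvSels d1 d2) := by
  induction d1 generalizing init with
  | nil => simp [pvSels]
  | cons p rest ih =>
    obtain ⟨bc, hsel, _⟩ := pv_item_sel (H p (List.mem_cons_self))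
    have step : (match pvDictGet d2 p.1 with
        | none => none
        | some w =>
          if w = p.2 then some (init ++ [(true, p.1)])
          else
            match d2.find? (fun q => q.2 == p.2) with
            | none => none
            | some q => some (init ++ [(false, q.1)])) = some (init ++ [bc]) := by
      unfold pvSel at hsel
      cases hg : pvDictGet d2 p.1 with
      | none => rw [hg] at hsel; simp at hsel
      | some w =>
        rw [hg] at hsel
        dsimp only at hsel ⊢
        by_cases hw : w = p.2
        · rw [if_pos hw] at hsel
          injection hsel with hbc; subst hbc
          rw [if_pos hw]
        · rw [if_neg hw] at hsel
          cases hf : d2.find? (fun q => q.2 == p.2) with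
          | none => rw [hf] at hsel; simp at hsel
          | some q =>
            rw [hf, Option.map_some] at hsel
            injection hsel with hbc; subst hbc
            rw [if_neg hw]
    simp only [List.foldl_cons, Option.bind_some, step]
    rw [ih _ (fun q hq => H q (List.mem_cons_of_mem _ hq))]
    simp [pvSels, hsel]

theorem pv_cols_fold (d1 d2 : List (Int × Int)) (m1 m2 : List (List Int)) (init : List (List Int))
    (H : ∀ p ∈ d1, Option.any (fun bc => pvColOK (if bc.1 then m1 else m2) bc.2) (pvSel d2 p) = true) :
    d1.foldl (fun acc p =>
      acc.bind (fun cols =>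
        match pvDictGet d2 p.1 with
        | none => none
        | some w =>
          if w = p.2 then (find_col m1 p.1).map (fun col => cols ++ [col])
          else
            match get_dict_key d2 p.2 with
            | none => none
            | some j => (find_col m2 j).map (fun col => cols ++ [col]))) (some init)
      = some (init ++ (pvSels d1 d2).map (fun bc => pvColVals (if bc.1 then m1 else m2) bc.2)) := by
  induction d1 generalizing init with
  | nil => simp [pvSels]
  | cons p rest ih =>
    obtain ⟨bc, hsel, hok⟩ := pv_item_sel (H p (List.mem_cons_self))
    have step : (match pvDictGet d2 p.1 with
        | none => none
        | some w =>
          if w = p.2 then (find_col m1 p.1).map (fun col => init ++ [col])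
          else
            match get_dict_key d2 p.2 with
            | none => none
            | some j => (find_col m2 j).map (fun col => init ++ [col]))
        = some (init ++ [pvColVals (if bc.1 then m1 else m2) bc.2]) := by
      unfold pvSel at hsel
      cases hg : pvDictGet d2 p.1 with
      | none => rw [hg] at hsel; simp at hsel
      | some w =>
        rw [hg] at hsel
        dsimp only at hsel ⊢
        by_cases hw : w = p.2
        · rw [if_pos hw] at hsel
          injection hsel with hbc; subst hbc
          simp only [if_pos] at hok
          rw [if_pos hw, pv_find_col_ok m1 p.1 (by simpa using hok)]
          simp
        · rw [if_neg hw] at hsel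
          cases hf : d2.find? (fun q => q.2 == p.2) with
          | none => rw [hf] at hsel; simp at hsel
          | some q =>
            rw [hf, Option.map_some] at hsel
            injection hsel with hbc; subst hbc
            simp only [Bool.false_eq_true, if_false] at hok ⊢
            rw [if_neg hw, pv_gdk_eq_find, hf]
            show (find_col m2 q.1).map (fun col => init ++ [col]) = _
            rw [pv_find_col_ok m2 q.1 (by simpa using hok)]
            simp
    simp only [List.foldl_cons, Option.bind_some, step]
    rw [ih _ (fun q hq => H q (List.mem_cons_of_mem _ hq))]
    simp [pvSels, hsel]

theorem pv_le_minNat_foldl (xs : List Nat) (a b : Nat) (hb : a ≤ b)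
    (h : ∀ x ∈ xs, a ≤ x) : a ≤ xs.foldl Nat.min b := by
  induction xs generalizing b with
  | nil => simpa
  | cons x xs ih =>
    exact ih (Nat.min b x) (le_min hb (h x List.mem_cons_self)) (fun y hy => h y (List.mem_cons_of_mem _ hy))

theorem pv_le_minNat (l : List Nat) (a : Nat) (hne : l ≠ []) (h : ∀ x ∈ l, a ≤ x) :
    a ≤ pvMinNat l := by
  cases l with
  | nil => simp at hne
  | cons x xs => exact pv_le_minNat_foldl xs a x (h x List.mem_cons_self) (fun y hy => h y (List.mem_cons_of_mem _ hy))

theorem pv_pyZip_eq (cols : List (List Int)) :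
    pyZip cols = (List.range (pvMinNat (cols.map List.length))).map
      (fun r => cols.map (fun col => col.getD r 0)) := by
  induction cols using pyZip.induct with
  | case1 => simp [pyZip, pvMinNat]
  | case2 r rs hany =>
    rw [pyZip]
    simp only [if_pos hany]
    simp only [List.any_eq_true, List.isEmpty_iff] at hany
    obtain ⟨col, hmem, hcol⟩ := hany
    have h0 : (0 : Nat) ∈ (r :: rs).map List.length :=
      List.mem_map.mpr ⟨col, hmem, by simp [hcol]⟩
    have hz : pvMinNat ((r :: rs).map List.length) = 0 :=
      Nat.le_zero.mp (pv_minNat_le _ 0 h0)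
    simp only [List.map_cons] at hz
    simp [hz]
  | case3 r rs hany ih =>
    rw [pyZip]
    simp only [if_neg hany]
    have hpos : ∀ x ∈ (r :: rs).map List.length, 1 ≤ x := by
      intro x hx
      obtain ⟨col, hmem, hlen⟩ := List.mem_map.mp hx
      have hne : col ≠ [] := by
        intro hc
        exact hany (List.any_eq_true.mpr ⟨col, hmem, by simp [hc]⟩)
      cases col with
      | nil => exact absurd rfl hne
      | cons a as => rw [← hlen]; simp
    have hmin1 : 1 ≤ pvMinNat ((r :: rs).map List.length) :=
      pv_le_minNat _ 1 (by simp) hpos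
    set n := pvMinNat ((r :: rs).map List.length) with hn
    have hlen_tail : (((r :: rs).map List.tail).map List.length)
        = ((r :: rs).map List.length).map (· - 1) := by
      simp [List.map_map, Function.comp_def, List.length_tail]
    have hmt : pvMinNat (((r :: rs).map List.tail).map List.length) = n - 1 := by
      rw [hlen_tail, pv_minNat_sub]
    rw [ih, hmt, show n = (n - 1) + 1 from (Nat.succ_pred_eq_of_pos hmin1).symm,
      List.range_succ_eq_map]
    simp only [List.map_cons, List.map_map, Nat.add_sub_cancel]
    congr 1
    · have h0 : ∀ l : List Int, l.head?.getD 0 = l[0]?.getD 0 := fun l => by cases l <;> rfl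
      simp [h0]
    · apply List.map_congr_left
      intro r' _
      simp [Function.comp_def]

-- ===== VERDICT (by name: the statement is the Claim_ definition above) =====
theorem align_matrix_spec : Claim_equal_align_matrix := by
  intro d1 m1 d2 m2 _dom hpre
  unfold Spec_align_matrix
  obtain ⟨_, _, hall⟩ := hpre
  unfold align_matrix align_matrix_alt
  by_cases hlen : d1.length = d2.length
  · have H : ∀ p ∈ d1,
        Option.any (fun bc => pvColOK (if bc.1 then m1 else m2) bc.2) (pvSel d2 p) = true :=
      fun p hp => List.all_eq_true.mp (hall hlen) p hp
    simp only [if_neg (show ¬(d1.length ≠ d2.length) from fun h => h hlen)]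
    rw [pv_cols_fold d1 d2 m1 m2 [] H]
    unfold pvPlan
    rw [pv_plan_fold d1 d2 m1 m2 [] H]
    simp only [List.nil_append, Option.map_some, Option.some.injEq]
    unfold list_reverse
    rw [pv_pyZip_eq]
    have hlens : ((pvSels d1 d2).map (fun bc => pvColVals (if bc.1 then m1 else m2) bc.2)).map List.length
        = (pvSels d1 d2).map (fun pc => (if pc.1 then m1 else m2).length) := by
      simp [List.map_map, Function.comp_def, pvColVals]
    rw [hlens]
    by_cases hpl : (pvSels d1 d2).isEmpty
    · rw [List.isEmpty_iff] at hpl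
      simp [hpl, pvMinNat]
    · rw [if_neg (by simpa using hpl)]
      apply List.map_congr_left
      intro r hr
      rw [List.mem_range] at hr
      rw [List.map_map]
      apply List.map_congr_left
      intro pc hpc
      have hle : pvMinNat ((pvSels d1 d2).map (fun pc => (if pc.1 then m1 else m2).length))
          ≤ (if pc.1 then m1 else m2).length :=
        pv_minNat_le _ _ (List.mem_map_of_mem hpc)
      have hrlt : r < (if pc.1 then m1 else m2).length := lt_of_lt_of_le hr hle
      simp only [Function.comp_def, pvColVals]
      rw [List.getD_eq_getElem _ 0 (by simpa using hrlt), List.getD_eq_getElem _ [] hrlt]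
      simp
  · simp [hlen]
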